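-- pv_equiv track=rewrite | github.com/tobiasschreieder/web-b-gone | extraction/structure_helper_refactor.py | candidate_filter_name
-- ===== SOURCE A (Python) =====
-- def candidate_filter_name(text: str) -> bool:
--     if text == "":
--         return False
--     if len(text) < 5:
--         return False
--     if text.count(" ") > 20:
--         return False
--     if any([char in text for char in ['%', '$', '!', '§', '&']]):
--         return False
--     if any(char.isdigit() for char in text):
--         return False
--     return True
-- ===== SOURCE B (Python) =====
-- def candidate_filter_name(text: str) -> bool:
--     # Single pass: accumulate a space counter and two flags instead of three separate scans.
--     if len(text) < 5:
--         return False
--     spaces = 0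
--     forbidden = False
--     digit = False
--     for ch in text:
--         if ch == ' ':
--             spaces += 1
--         if ch in ('%', '$', '!', '\u00a7', '&'):
--             forbidden = True
--         if ch.isdigit():
--             digit = True
--     return not (spaces > 20 or forbidden or digit)
-- ===== Notes on version B (the rewrite author's own statement) =====
-- stated objective: simpler
-- what changed: Replaces the three separate whole-string scans (count, substring-membership list comprehension, digit generator) by a single loop that accumulates a space counter and two boolean flags, with one combined check at the end.
import Mathlib
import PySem

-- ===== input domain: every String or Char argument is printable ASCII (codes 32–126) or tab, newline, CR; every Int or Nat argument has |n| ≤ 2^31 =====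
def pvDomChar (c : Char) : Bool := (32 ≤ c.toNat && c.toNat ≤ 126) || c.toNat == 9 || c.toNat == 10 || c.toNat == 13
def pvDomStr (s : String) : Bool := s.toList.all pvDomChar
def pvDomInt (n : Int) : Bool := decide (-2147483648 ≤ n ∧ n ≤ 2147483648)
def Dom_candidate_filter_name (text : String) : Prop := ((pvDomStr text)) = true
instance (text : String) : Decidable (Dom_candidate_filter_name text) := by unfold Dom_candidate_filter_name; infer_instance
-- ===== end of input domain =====

-- B fuses A's three separate scans into one loop maintaining a space counter and two flags (objective: simpler).

-- ===== PORT A =====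
def candidate_filter_name (text : String) : Bool :=
  if text = "" then false
  else if PySem.Str.len text < 5 then false
  else if PySem.Str.count text " " > 20 then false
  else if (['%', '$', '!', '§', '&'].map (fun ch => PySem.Str.isIn (String.ofList [ch]) text)).any id then false
  else if text.toList.any (fun ch => PySem.Chars.isdigit ch) then false
  else true

-- ===== PORT B =====
def candidate_filter_name_alt (text : String) : Bool :=
  let cs := text.toList
  if cs.length < 5 then false
  else
    let st := cs.foldl (fun (st : Nat × Bool × Bool) ch =>
      (if ch = ' ' then st.1 + 1 else st.1,
       st.2.1 || decide (ch ∈ ['%', '$', '!', '§', '&']),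
       st.2.2 || PySem.Chars.isdigit ch)) (0, false, false)
    !(decide (st.1 > 20) || st.2.1 || st.2.2)

-- ===== PRECONDITION & SPEC =====
def Spec_candidate_filter_name (text : String) (out : Bool) : Prop := out = candidate_filter_name_alt text
instance (text : String) (out : Bool) : Decidable (Spec_candidate_filter_name text out) := by unfold Spec_candidate_filter_name; infer_instance

-- ===== CLAIM (what is proved, stated in full; the proofs are below) =====
def Claim_equal_candidate_filter_name : Prop := ∀ (text : String), Dom_candidate_filter_name text → Spec_candidate_filter_name text (candidate_filter_name text)

-- ===== LEMMAS AND PROOFS =====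

-- single-character substring count is the plain character count
theorem count_go_single (c : Char) : ∀ (fuel : Nat) (l : List Char) (acc : Nat),
    l.length ≤ fuel → PySem.Chars.count.go [c] fuel l acc = acc + l.count c := by
  intro fuel
  induction fuel with
  | zero => intro l acc h; cases l with
    | nil => simp [PySem.Chars.count.go]
    | cons x t => simp at h
  | succ n ih =>
    intro l acc h
    cases l with
    | nil => simp [PySem.Chars.count.go]
    | cons x t =>
      simp only [PySem.Chars.count.go]
      by_cases hx : c = x
      · subst hx
        rw [if_pos (by simp [List.isPrefixOf])]
        simp only [List.length_singleton, List.drop_succ_cons, List.drop_zero]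
        rw [ih t (acc + 1) (by simpa using h)]
        simp [List.count_cons]
        omega
      · have hxc : ¬ x = c := fun hh => hx hh.symm
        rw [if_neg (by simp [List.isPrefixOf]; exact hx)]
        rw [ih t acc (by simpa using h)]
        simp [List.count_cons, hxc]

theorem count_single (c : Char) (s : List Char) :
    PySem.Chars.count s [c] = s.count c := by
  simp [PySem.Chars.count, count_go_single c s.length s 0 le_rfl]

-- the fold computes (space count, forbidden flag, digit flag)
theorem fold_state (cs : List Char) : ∀ (a : Nat) (b d : Bool),
    cs.foldl (fun (st : Nat × Bool × Bool) ch =>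
      (if ch = ' ' then st.1 + 1 else st.1,
       st.2.1 || decide (ch ∈ ['%', '$', '!', '§', '&']),
       st.2.2 || PySem.Chars.isdigit ch)) (a, b, d)
    = (a + cs.count ' ',
       b || cs.any (fun ch => decide (ch ∈ ['%', '$', '!', '§', '&'])),
       d || cs.any (fun ch => PySem.Chars.isdigit ch)) := by
  induction cs with
  | nil => intro a b d; simp
  | cons x t ih =>
    intro a b d
    simp only [List.foldl_cons, ih, List.any_cons, List.count_cons, Prod.mk.injEq]
    refine ⟨?_, ?_, ?_⟩
    · by_cases hx : x = ' '
      · simp [hx]; omega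
      · simp [hx]
    · simp [Bool.or_assoc]
    · simp [Bool.or_assoc]

-- 'c in s' for a one-character needle is plain character membership
theorem isIn_single (c : Char) (cs : List Char) :
    PySem.Chars.isIn [c] cs = cs.contains c := by
  by_cases h : c ∈ cs
  · obtain ⟨l1, l2, hsplit⟩ := List.append_of_mem h
    have hinf : [c] <:+: cs := ⟨l1, l2, by simp [hsplit]⟩
    rw [(PySem.Chars.isIn_iff_infix _ _).mpr hinf]
    simp [h]
  · rw [(PySem.Chars.isIn_eq_false_iff _ _).mpr (fun hinf => h (hinf.subset (by simp)))]
    simp [h]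

-- any-over-needles equals any-over-haystack
theorem any_comm (cs L : List Char) :
    (L.map (fun ch => cs.contains ch)).any id = cs.any (fun ch => decide (ch ∈ L)) := by
  refine Bool.eq_iff_iff.mpr ?_
  simp only [List.any_map, List.any_eq_true, Function.comp, id, List.contains_eq_mem,
    decide_eq_true_eq]
  exact ⟨fun ⟨x, hx, hm⟩ => ⟨x, hm, hx⟩, fun ⟨x, hx, hm⟩ => ⟨x, hm, hx⟩⟩

-- ===== VERDICT (by name: the statement is the Claim_ definition above) =====
theorem candidate_filter_name_spec : Claim_equal_candidate_filter_name := by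
  intro text _
  unfold Spec_candidate_filter_name candidate_filter_name candidate_filter_name_alt
  simp only [fold_state, Nat.zero_add, Bool.false_or]
  by_cases he : text = ""
  · subst he; simp
  · have hlen : text.toList.length = text.length := by simp
    rw [if_neg he]
    by_cases hl : text.toList.length < 5
    · have h5 : PySem.Str.len text < 5 := by
        simp only [PySem.Str.len_eq, ← hlen]; exact_mod_cast hl
      rw [if_pos h5, if_pos hl]
    · have h5 : ¬ PySem.Str.len text < 5 := by
        simp only [PySem.Str.len_eq, ← hlen]; intro hc; exact hl (by exact_mod_cast hc)
      rw [if_neg h5, if_neg hl]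
      have hc : PySem.Str.count text " " = text.toList.count ' ' := by
        have : (" " : String).toList = [' '] := by decide
        simp only [PySem.Str.count_eq, this, count_single]
      have hm : (List.map (fun ch => PySem.Str.isIn (String.ofList [ch]) text) ['%', '$', '!', '§', '&']).any id
          = text.toList.any (fun ch => decide (ch ∈ ['%', '$', '!', '§', '&'])) := by
        simp only [PySem.Str.isIn_eq, String.toList_ofList, isIn_single]
        exact any_comm _ _
      rw [hc, hm]
      rcases h2 : text.toList.any (fun ch => decide (ch ∈ ['%', '$', '!', '§', '&'])) <;>
      rcases h3 : text.toList.any (fun ch => PySem.Chars.isdigit ch) <;>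
      by_cases h1 : text.toList.count ' ' > 20 <;>
      simp [h1]
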